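-- pv_equiv track=rewrite | github.com/RealForce1024/flask-echarts | test.py | split_v3
-- ===== SOURCE A (Python) =====
-- def split_v3(list):
--     length = len(list)
--     collection = []
--     for i in range(length - 1):
--         lst = []
--         for j in range(length - 1 - i):
--             if list[j] == list[j + 1]:
--                 lst.append(list[j])
--             else:
--                 continue
--         collection.append(lst)
--     return collection
-- ===== SOURCE B (Python) =====
-- def split_v3(list):
--     n = len(list)
--     pos = []
--     vals = []
--     for j in range(n - 1):
--         if list[j] == list[j + 1]:
--             pos.append(j)
--             vals.append(list[j])
--     out = []
--     k = len(pos)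
--     for cutoff in range(n - 1, 0, -1):
--         while k > 0 and pos[k - 1] >= cutoff:
--             k -= 1
--         out.append(vals[:k])
--     return out
-- ===== Notes on version B (the rewrite author's own statement) =====
-- stated objective: faster
-- what changed: B precomputes the adjacent-equal match positions and values in one pass, then emits each shrinking-prefix row as a slice of that match list using a pointer that only moves down, instead of re-scanning the whole prefix for every row; intended as faster (asymptotically so when matches are sparse; a timing run measured ~3x on duplicate-heavy inputs, where the output itself is quadratic).
import Mathlib
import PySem

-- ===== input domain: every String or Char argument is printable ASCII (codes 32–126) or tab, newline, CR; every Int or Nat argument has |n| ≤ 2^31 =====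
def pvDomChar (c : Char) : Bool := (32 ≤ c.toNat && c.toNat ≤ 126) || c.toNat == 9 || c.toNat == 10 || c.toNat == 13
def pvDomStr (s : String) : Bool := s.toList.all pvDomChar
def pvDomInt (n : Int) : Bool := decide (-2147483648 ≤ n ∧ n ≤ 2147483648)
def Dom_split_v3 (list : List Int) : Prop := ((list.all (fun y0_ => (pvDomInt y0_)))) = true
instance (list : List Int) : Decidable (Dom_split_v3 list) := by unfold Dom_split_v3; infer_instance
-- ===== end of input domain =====

-- B precomputes the adjacent-equal match positions/values once and emits each shrinking
-- prefix as a slice via a downward-moving pointer, replacing A's rescans; intended as faster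
-- (a timing run measured ~3x on duplicate-heavy inputs, where the output is quadratic).

-- ===== PORT A =====
def split_v3 (list : List Int) : List (List Int) :=
  let length : Int := (list.length : Int)
  (PySem.List.pyRange 0 (length - 1) 1).foldl
    (fun collection i =>
      collection ++ [(PySem.List.pyRange 0 (length - 1 - i) 1).foldl
        (fun lst j =>
          if PySem.List.pyGetD list j 0 = PySem.List.pyGetD list (j + 1) 0 then
            lst ++ [PySem.List.pyGetD list j 0]
          else lst) []])
    []

-- ===== PORT B =====
-- the 'while k > 0 and pos[k-1] >= cutoff: k -= 1' loop of Source B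
def altWhile (pos : List Int) (k : Nat) (cutoff : Int) : Nat :=
  if h : 0 < k ∧ cutoff ≤ PySem.List.pyGetD pos ((k : Int) - 1) 0 then
    altWhile pos (k - 1) cutoff
  else k
termination_by k
decreasing_by omega

def split_v3_alt (list : List Int) : List (List Int) :=
  let n : Int := (list.length : Int)
  let pv : List Int × List Int :=
    (PySem.List.pyRange 0 (n - 1) 1).foldl
      (fun pv j =>
        if PySem.List.pyGetD list j 0 = PySem.List.pyGetD list (j + 1) 0 then
          (pv.1 ++ [j], pv.2 ++ [PySem.List.pyGetD list j 0])
        else pv) ([], [])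
  ((PySem.List.pyRange (n - 1) 0 (-1)).foldl
      (fun (st : List (List Int) × Nat) cutoff =>
        let k := altWhile pv.1 st.2 cutoff
        (st.1 ++ [PySem.List.slice pv.2 none (some (k : Int))], k))
      ([], pv.1.length)).1

-- ===== PRECONDITION & SPEC =====
def Spec_split_v3 (list : List Int) (out : List (List Int)) : Prop := out = split_v3_alt list
instance (list : List Int) (out : List (List Int)) : Decidable (Spec_split_v3 list out) := by unfold Spec_split_v3; infer_instance

-- ===== CLAIM (what is proved, stated in full; the proofs are below) =====
def Claim_equal_split_v3 : Prop := ∀ (list : List Int), Dom_split_v3 list → Spec_split_v3 list (split_v3 list)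

-- ===== LEMMAS AND PROOFS =====

-- the list of adjacent-match positions (both programs filter the same range by the same test)
def pvPf (list : List Int) : List Int :=
  (PySem.List.pyRange 0 ((list.length : Int) - 1) 1).filter
    (fun j => decide (PySem.List.pyGetD list j 0 = PySem.List.pyGetD list (j + 1) 0))

-- the row emitted for a cutoff c: values at match positions below c
def pvRow (list : List Int) (c : Int) : List Int :=
  ((pvPf list).filter (fun j => decide (j < c))).map (fun j => PySem.List.pyGetD list j 0)

-- rows for cutoffs m, m-1, …, 1
def pvRows (list : List Int) (m : Nat) : List (List Int) :=
  (List.range m).map (fun (t : Nat) => pvRow list ((m : Int) - (t : Int)))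

lemma pvPf_pairwise (list : List Int) : (pvPf list).Pairwise (· < ·) :=
  (PySem.List.pairwise_lt_pyRange_one 0 ((list.length : Int) - 1)).filter _

-- a prefix of a range is the filter below a cutoff
lemma range_filter_lt (m c : Int) (h0 : 0 ≤ c) (h1 : c ≤ m) :
    (PySem.List.pyRange 0 m 1).filter (fun j => decide (j < c)) = PySem.List.pyRange 0 c 1 := by
  rw [PySem.List.pyRange_one_append 0 c m h0 h1, List.filter_append]
  have e1 : (PySem.List.pyRange 0 c 1).filter (fun j => decide (j < c)) = PySem.List.pyRange 0 c 1 := by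
    apply List.filter_eq_self.2
    intro a ha
    simp only [decide_eq_true_eq]
    exact (PySem.List.mem_pyRange_one.1 ha).2
  have e2 : (PySem.List.pyRange c m 1).filter (fun j => decide (j < c)) = [] := by
    apply List.filter_eq_nil_iff.2
    intro a ha
    simp only [decide_eq_true_eq, not_lt]
    exact (PySem.List.mem_pyRange_one.1 ha).1
  rw [e1, e2, List.append_nil]

-- in a strictly increasing list, the elements below c are exactly the first (count) positions
lemma sortedCount (c : Int) : ∀ (S : List Int), S.Pairwise (· < ·) →
    ∀ i (h : i < S.length),
      (S[i] < c ↔ i < (S.filter (fun j => decide (j < c))).length) := by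
  intro S
  induction S with
  | nil => intro _ i h; simp at h
  | cons x t ih =>
    intro hp i h
    have hx : ∀ y ∈ t, x < y := fun y hy => (List.pairwise_cons.1 hp).1 y hy
    have ht : t.Pairwise (· < ·) := (List.pairwise_cons.1 hp).2
    by_cases hxc : x < c
    · have e : (x :: t).filter (fun j => decide (j < c)) = x :: t.filter (fun j => decide (j < c)) := by
        simp [hxc]
      rw [e]
      cases i with
      | zero => simpa using hxc
      | succ i =>
        simp only [List.getElem_cons_succ, List.length_cons]
        rw [ih ht i (by simpa using h)]
        omega
    · have hnil : (x :: t).filter (fun j => decide (j < c)) = [] := by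
        apply List.filter_eq_nil_iff.2
        intro a ha
        simp only [decide_eq_true_eq, not_lt]
        rcases List.mem_cons.1 ha with rfl | hat
        · omega
        · have := hx a hat; omega
      rw [hnil]
      simp only [List.length_nil]
      constructor
      · intro hlt
        exfalso
        cases i with
        | zero => simp only [List.getElem_cons_zero] at hlt; omega
        | succ i =>
          simp only [List.getElem_cons_succ] at hlt
          have hi : i < t.length := by simpa using h
          have : x < t[i] := hx _ (List.getElem_mem hi)
          omega
      · intro h'; omega

-- in a strictly increasing list the filter below c is a prefix
lemma sorted_filter_lt_eq_take (c : Int) : ∀ (S : List Int), S.Pairwise (· < ·) →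
    S.filter (fun j => decide (j < c)) =
      S.take ((S.filter (fun j => decide (j < c))).length) := by
  intro S
  induction S with
  | nil => intro _; rfl
  | cons x t ih =>
    intro hp
    have hx : ∀ y ∈ t, x < y := fun y hy => (List.pairwise_cons.1 hp).1 y hy
    have ht : t.Pairwise (· < ·) := (List.pairwise_cons.1 hp).2
    by_cases hxc : x < c
    · have e : (x :: t).filter (fun j => decide (j < c)) = x :: t.filter (fun j => decide (j < c)) := by
        simp [hxc]
      rw [e]
      simp only [List.length_cons, List.take_succ_cons]
      rw [← ih ht]
    · have hnil : (x :: t).filter (fun j => decide (j < c)) = [] := by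
        apply List.filter_eq_nil_iff.2
        intro a ha
        simp only [decide_eq_true_eq, not_lt]
        rcases List.mem_cons.1 ha with rfl | hat
        · omega
        · have := hx a hat; omega
      rw [hnil]
      rfl

lemma cnt_mono (S : List Int) (c c' : Int) (h : c ≤ c') :
    (S.filter (fun j => decide (j < c))).length ≤ (S.filter (fun j => decide (j < c'))).length :=
  (List.monotone_filter_right S (fun a ha => by
    simp only [decide_eq_true_eq] at *; omega)).length_le

-- the while loop lands exactly on the count of positions below the cutoff
lemma altWhile_eq (S : List Int) (hp : S.Pairwise (· < ·)) (c : Int) :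
    ∀ k, (S.filter (fun j => decide (j < c))).length ≤ k → k ≤ S.length →
      altWhile S k c = (S.filter (fun j => decide (j < c))).length := by
  intro k
  induction k with
  | zero =>
    intro h1 _
    rw [altWhile]
    simp only [lt_self_iff_false, false_and, dite_false]
    omega
  | succ k ih =>
    intro h1 h2
    have hk : k < S.length := by omega
    have hget : PySem.List.pyGetD S ((k + 1 : Nat) - 1 : Int) 0 = S[k] := by
      have : ((k + 1 : Nat) : Int) - 1 = ((k : Nat) : Int) := by push_cast; ring
      rw [this, PySem.List.pyGetD_natCast, List.getD_eq_getElem?_getD, List.getElem?_eq_getElem hk]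
      rfl
    by_cases hc : S[k] < c
    · -- k is inside the kept prefix: the count is k+1 and the loop stops
      have : k + 1 ≤ (S.filter (fun j => decide (j < c))).length := (sortedCount c S hp k hk).1 hc
      have hcnt : (S.filter (fun j => decide (j < c))).length = k + 1 := by omega
      rw [altWhile]
      have : ¬ (0 < k + 1 ∧ c ≤ PySem.List.pyGetD S ((k + 1 : Nat) - 1 : Int) 0) := by
        rw [hget]; omega
      simp only [this, dite_false]
      omega
    · -- S[k] ≥ cutoff: decrement
      have hcnt : (S.filter (fun j => decide (j < c))).length ≤ k := by
        have := (sortedCount c S hp k hk).2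
        omega
      rw [altWhile]
      have hcond : (0 < k + 1 ∧ c ≤ PySem.List.pyGetD S ((k + 1 : Nat) - 1 : Int) 0) := by
        rw [hget]; omega
      simp only [hcond]
      exact ih hcnt (by omega)

-- the pair-building fold computes the filtered positions and their values
lemma pairFold (list : List Int) : ∀ (l : List Int) (a b : List Int),
    l.foldl (fun pv j =>
        if PySem.List.pyGetD list j 0 = PySem.List.pyGetD list (j + 1) 0 then
          (pv.1 ++ [j], pv.2 ++ [PySem.List.pyGetD list j 0])
        else pv) (a, b) =
      (a ++ l.filter (fun j => decide (PySem.List.pyGetD list j 0 = PySem.List.pyGetD list (j + 1) 0)),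
       b ++ (l.filter (fun j => decide (PySem.List.pyGetD list j 0 = PySem.List.pyGetD list (j + 1) 0))).map
              (fun j => PySem.List.pyGetD list j 0)) := by
  intro l
  induction l with
  | nil => intro a b; simp
  | cons x t ih =>
    intro a b
    by_cases hx : PySem.List.pyGetD list x 0 = PySem.List.pyGetD list (x + 1) 0
    · rw [List.foldl_cons, if_pos hx, ih]
      simp [hx]
    · rw [List.foldl_cons, if_neg hx, ih]
      simp [hx]

lemma pvRows_succ (list : List Int) (m : Nat) :
    pvRows list (m + 1) = pvRow list ((m + 1 : Nat) : Int) :: pvRows list m := by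
  unfold pvRows
  rw [List.range_succ_eq_map, List.map_cons, List.map_map]
  simp only [Nat.cast_zero, sub_zero]
  congr 1
  apply List.map_congr_left
  intro t _
  simp only [Function.comp_apply]
  congr 1
  push_cast
  ring

-- the descending fold emits pvRows, given the pointer invariant
lemma foldB (list : List Int) (hp : (pvPf list).Pairwise (· < ·)) :
    ∀ (m : Nat) (acc : List (List Int)) (k : Nat),
      ((pvPf list).filter (fun j => decide (j < (m : Int)))).length ≤ k → k ≤ (pvPf list).length →
      ((PySem.List.pyRange (m : Int) 0 (-1)).foldl
        (fun (st : List (List Int) × Nat) cutoff =>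
          (st.1 ++ [PySem.List.slice ((pvPf list).map (fun j => PySem.List.pyGetD list j 0)) none
                      (some ((altWhile (pvPf list) st.2 cutoff : Nat) : Int))],
           altWhile (pvPf list) st.2 cutoff))
        (acc, k)).1 = acc ++ pvRows list m := by
  intro m
  induction m with
  | zero =>
    intro acc k _ _
    rw [PySem.List.pyRange_neg_one_eq_nil (by norm_num)]
    simp [pvRows]
  | succ m ih =>
    intro acc k h1 h2
    have hcons : PySem.List.pyRange ((m + 1 : Nat) : Int) 0 (-1)
        = ((m + 1 : Nat) : Int) :: PySem.List.pyRange ((m : Nat) : Int) 0 (-1) := by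
      have h : (0 : Int) < ((m + 1 : Nat) : Int) := by positivity
      have e : ((m + 1 : Nat) : Int) - 1 = ((m : Nat) : Int) := by push_cast; ring
      rw [PySem.List.pyRange_neg_one_cons h, e]
    rw [hcons, List.foldl_cons]
    have hk : altWhile (pvPf list) k ((m + 1 : Nat) : Int)
        = ((pvPf list).filter (fun j => decide (j < ((m + 1 : Nat) : Int)))).length :=
      altWhile_eq (pvPf list) hp _ k h1 h2
    set cnt1 := ((pvPf list).filter (fun j => decide (j < ((m + 1 : Nat) : Int)))).length with hcnt1
    have hrow : PySem.List.slice ((pvPf list).map (fun j => PySem.List.pyGetD list j 0)) none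
        (some ((cnt1 : Nat) : Int)) = pvRow list ((m + 1 : Nat) : Int) := by
      rw [PySem.List.slice_to_natCast, ← List.map_take, pvRow]
      congr 1
      exact (sorted_filter_lt_eq_take _ _ hp).symm
    rw [hk, hrow]
    have hmono : ((pvPf list).filter (fun j => decide (j < ((m : Nat) : Int)))).length ≤ cnt1 := by
      apply cnt_mono
      push_cast; omega
    have hlen : cnt1 ≤ (pvPf list).length := List.length_filter_le _ _
    rw [ih (acc ++ [pvRow list ((m + 1 : Nat) : Int)]) cnt1 hmono hlen]
    rw [pvRows_succ]
    simp

-- A's inner loop for cutoff c is pvRow c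
lemma rowA_eq (list : List Int) (c : Int) (h0 : 0 ≤ c) (h1 : c ≤ (list.length : Int) - 1) :
    (PySem.List.pyRange 0 c 1).foldl
      (fun lst j =>
        if PySem.List.pyGetD list j 0 = PySem.List.pyGetD list (j + 1) 0 then
          lst ++ [PySem.List.pyGetD list j 0]
        else lst) [] = pvRow list c := by
  rw [PySem.List.foldl_append_ite
        (fun j => PySem.List.pyGetD list j 0 = PySem.List.pyGetD list (j + 1) 0)
        (fun j => PySem.List.pyGetD list j 0)]
  rw [List.nil_append, pvRow, pvPf, List.filter_comm, range_filter_lt _ c h0 h1]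

lemma A_eq (list : List Int) (m : Nat) (hm : list.length = m + 1) :
    split_v3 list = pvRows list m := by
  unfold split_v3
  simp only
  rw [PySem.List.foldl_append_singleton_eq_map, List.nil_append]
  have hL : (list.length : Int) - 1 = (m : Int) := by rw [hm]; push_cast; ring
  rw [hL, PySem.List.pyRange_one, List.map_map]
  unfold pvRows
  have hT : ((m : Int) - 0).toNat = m := by omega
  rw [hT]
  apply List.map_congr_left
  intro t ht
  have htm : t < m := List.mem_range.1 ht
  simp only [Function.comp]
  have harg : (m : Int) - (0 + (t : Int)) = (m : Int) - (t : Int) := by ring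
  rw [harg]
  exact rowA_eq list _ (by omega) (by rw [hL]; omega)

lemma B_eq (list : List Int) (m : Nat) (hm : list.length = m + 1) :
    split_v3_alt list = pvRows list m := by
  unfold split_v3_alt
  simp only
  have hL : (list.length : Int) - 1 = (m : Int) := by rw [hm]; push_cast; ring
  rw [hL]
  have hpv := pairFold list (PySem.List.pyRange 0 ((m : Nat) : Int) 1) [] []
  rw [← hL] at hpv
  have hPf : (PySem.List.pyRange 0 ((list.length : Int) - 1) 1).filter
      (fun j => decide (PySem.List.pyGetD list j 0 = PySem.List.pyGetD list (j + 1) 0)) = pvPf list := rfl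
  rw [hL] at hpv
  rw [hpv]
  simp only [List.nil_append]
  rw [← hL, hPf, hL]
  have := foldB list (pvPf_pairwise list) m []
      (pvPf list).length (List.length_filter_le _ _) (le_refl _)
  simpa using this

-- ===== VERDICT (by name: the statement is the Claim_ definition above) =====
theorem split_v3_spec : Claim_equal_split_v3 := by
  intro list _
  unfold Spec_split_v3
  cases hm : list.length with
  | zero =>
    have : list = [] := List.length_eq_zero_iff.1 hm
    subst this
    rfl
  | succ m =>
    rw [A_eq list m hm, B_eq list m hm]
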